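-- pv_equiv track=rewrite | github.com/TakaIshikawa/blueprint | src/blueprint/task_background_job_retry_readiness.py | _required_safeguards
-- ===== SOURCE A (Python) =====
-- from typing import Any, Iterable, Literal, Mapping, TypeVar
--
-- BackgroundJobRetryCategory = Literal[
--     "async_job",
--     "queue_worker",
--     "scheduled_job",
--     "retry_policy",
--     "dead_letter_queue",
--     "duplicate_execution",
--     "timeout",
-- ]
--
-- BackgroundJobRetrySafeguard = Literal[
--     "idempotent_job_handler",
--     "retry_limit",
--     "exponential_backoff",
--     "dead_letter_monitoring",
--     "timeout_budget",
--     "duplicate_suppression",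
-- ]
--
-- _SAFEGUARD_ORDER: tuple[BackgroundJobRetrySafeguard, ...] = (
--     "idempotent_job_handler",
--     "retry_limit",
--     "exponential_backoff",
--     "dead_letter_monitoring",
--     "timeout_budget",
--     "duplicate_suppression",
-- )
--
-- def _required_safeguards(
--     categories: tuple[BackgroundJobRetryCategory, ...],
-- ) -> tuple[BackgroundJobRetrySafeguard, ...]:
--     category_set = set(categories)
--     required: set[BackgroundJobRetrySafeguard] = set()
--     if {"async_job", "queue_worker", "scheduled_job", "retry_policy", "duplicate_execution"} & category_set:
--         required.add("idempotent_job_handler")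
--     if "retry_policy" in category_set:
--         required.update({"retry_limit", "exponential_backoff"})
--     if {"queue_worker", "retry_policy", "dead_letter_queue"} & category_set:
--         required.add("dead_letter_monitoring")
--     if {"async_job", "scheduled_job", "retry_policy", "timeout"} & category_set:
--         required.add("timeout_budget")
--     if {"queue_worker", "retry_policy", "duplicate_execution"} & category_set:
--         required.add("duplicate_suppression")
--     return tuple(safeguard for safeguard in _SAFEGUARD_ORDER if safeguard in required)
-- ===== SOURCE B (Python) =====
-- _SAFEGUARD_ORDER = (
--     "idempotent_job_handler",
--     "retry_limit",
--     "exponential_backoff",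
--     "dead_letter_monitoring",
--     "timeout_budget",
--     "duplicate_suppression",
-- )
--
-- # Transposed lookup table: each category -> the safeguards it requires.
-- _CATEGORY_SAFEGUARDS = {
--     "async_job": ("idempotent_job_handler", "timeout_budget"),
--     "queue_worker": ("idempotent_job_handler", "dead_letter_monitoring", "duplicate_suppression"),
--     "scheduled_job": ("idempotent_job_handler", "timeout_budget"),
--     "retry_policy": _SAFEGUARD_ORDER,
--     "dead_letter_queue": ("dead_letter_monitoring",),
--     "duplicate_execution": ("idempotent_job_handler", "duplicate_suppression"),
--     "timeout": ("timeout_budget",),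
-- }
--
-- def _required_safeguards(categories):
--     present = set(categories)
--     required = set()
--     for category, safeguards in _CATEGORY_SAFEGUARDS.items():
--         if category in present:
--             required.update(safeguards)
--     return tuple(s for s in _SAFEGUARD_ORDER if s in required)
-- ===== Notes on version B (the rewrite author's own statement) =====
-- stated objective: simpler
-- what changed: Replaces the five hand-written per-safeguard branch conditions with a single category->safeguards lookup table: one loop unions the safeguards of each present category, then filters the fixed order list.
import Mathlib
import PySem

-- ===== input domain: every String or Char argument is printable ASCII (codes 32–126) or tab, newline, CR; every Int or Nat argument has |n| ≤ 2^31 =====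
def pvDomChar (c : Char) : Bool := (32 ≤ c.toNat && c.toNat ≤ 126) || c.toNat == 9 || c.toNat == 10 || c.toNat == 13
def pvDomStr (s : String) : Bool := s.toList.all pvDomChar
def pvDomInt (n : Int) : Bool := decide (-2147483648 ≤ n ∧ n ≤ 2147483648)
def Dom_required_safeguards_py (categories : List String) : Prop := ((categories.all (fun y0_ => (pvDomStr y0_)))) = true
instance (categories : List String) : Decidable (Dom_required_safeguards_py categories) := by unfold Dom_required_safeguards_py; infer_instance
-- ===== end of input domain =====

-- ===== PORT A =====
-- B replaces A's five per-safeguard branch conditions with a category→safeguards lookup table (objective: simpler).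
def pvSafeguardOrder : List String :=
  ["idempotent_job_handler", "retry_limit", "exponential_backoff",
   "dead_letter_monitoring", "timeout_budget", "duplicate_suppression"]

def required_safeguards_py (categories : List String) : List String :=
  let categorySet : PySem.Set String := PySem.Set.ofList categories
  let required : PySem.Set String := PySem.Set.empty
  let required := if PySem.Set.inter (PySem.Set.ofList ["async_job", "queue_worker", "scheduled_job", "retry_policy", "duplicate_execution"]) categorySet ≠ [] then PySem.Set.add required "idempotent_job_handler" else required
  let required := if PySem.Set.contains categorySet "retry_policy" then PySem.Set.update required (PySem.Set.ofList ["retry_limit", "exponential_backoff"]) else required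
  let required := if PySem.Set.inter (PySem.Set.ofList ["queue_worker", "retry_policy", "dead_letter_queue"]) categorySet ≠ [] then PySem.Set.add required "dead_letter_monitoring" else required
  let required := if PySem.Set.inter (PySem.Set.ofList ["async_job", "scheduled_job", "retry_policy", "timeout"]) categorySet ≠ [] then PySem.Set.add required "timeout_budget" else required
  let required := if PySem.Set.inter (PySem.Set.ofList ["queue_worker", "retry_policy", "duplicate_execution"]) categorySet ≠ [] then PySem.Set.add required "duplicate_suppression" else required
  pvSafeguardOrder.filter (fun s => PySem.Set.contains required s)

-- ===== PORT B =====
def pvCategorySafeguards : List (String × List String) :=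
  [("async_job", ["idempotent_job_handler", "timeout_budget"]),
   ("queue_worker", ["idempotent_job_handler", "dead_letter_monitoring", "duplicate_suppression"]),
   ("scheduled_job", ["idempotent_job_handler", "timeout_budget"]),
   ("retry_policy", pvSafeguardOrder),
   ("dead_letter_queue", ["dead_letter_monitoring"]),
   ("duplicate_execution", ["idempotent_job_handler", "duplicate_suppression"]),
   ("timeout", ["timeout_budget"])]

def required_safeguards_py_alt (categories : List String) : List String :=
  let present : PySem.Set String := PySem.Set.ofList categories
  let required : PySem.Set String :=
    pvCategorySafeguards.foldl
      (fun req p => if PySem.Set.contains present p.1 then PySem.Set.update req p.2 else req)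
      PySem.Set.empty
  pvSafeguardOrder.filter (fun s => PySem.Set.contains required s)

-- ===== PRECONDITION & SPEC =====
def Spec_required_safeguards_py (categories : List String) (out : List String) : Prop := out = required_safeguards_py_alt categories
instance (categories : List String) (out : List String) : Decidable (Spec_required_safeguards_py categories out) := by unfold Spec_required_safeguards_py; infer_instance

-- ===== CLAIM (what is proved, stated in full; the proofs are below) =====
def Claim_equal_required_safeguards_py : Prop := ∀ (categories : List String), Dom_required_safeguards_py categories → Spec_required_safeguards_py categories (required_safeguards_py categories)

-- ===== LEMMAS AND PROOFS =====

-- membership test on set(categories) equals membership test on categories itself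
theorem pv_contains_ofList (categories : List String) (x : String) :
    List.contains (PySem.Set.ofList categories) x = categories.contains x := by
  rw [List.contains_eq_mem, List.contains_eq_mem]
  exact decide_eq_decide.mpr (PySem.Set.mem_ofList categories x)

-- both ports depend on categories only through the membership flags of the seven known
-- category strings; abstract those seven booleans and check all 128 cases by kernel evaluation
theorem pv_main (categories : List String) :
    required_safeguards_py categories = required_safeguards_py_alt categories := by
  have e1 : PySem.Set.ofList ["async_job", "queue_worker", "scheduled_job", "retry_policy", "duplicate_execution"] = ["async_job", "queue_worker", "scheduled_job", "retry_policy", "duplicate_execution"] := by decide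
  have e2 : PySem.Set.ofList ["queue_worker", "retry_policy", "dead_letter_queue"] = ["queue_worker", "retry_policy", "dead_letter_queue"] := by decide
  have e3 : PySem.Set.ofList ["async_job", "scheduled_job", "retry_policy", "timeout"] = ["async_job", "scheduled_job", "retry_policy", "timeout"] := by decide
  have e4 : PySem.Set.ofList ["queue_worker", "retry_policy", "duplicate_execution"] = ["queue_worker", "retry_policy", "duplicate_execution"] := by decide
  unfold required_safeguards_py required_safeguards_py_alt pvCategorySafeguards
  simp only [PySem.Set.inter, PySem.Set.contains_eq_listContains, e1, e2, e3, e4,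
             List.foldl_cons, List.foldl_nil, List.filter_cons, List.filter_nil,
             pv_contains_ofList]
  generalize categories.contains "async_job" = b1
  generalize categories.contains "queue_worker" = b2
  generalize categories.contains "scheduled_job" = b3
  generalize categories.contains "retry_policy" = b4
  generalize categories.contains "dead_letter_queue" = b5
  generalize categories.contains "duplicate_execution" = b6
  generalize categories.contains "timeout" = b7
  revert b1 b2 b3 b4 b5 b6 b7
  decide

-- ===== VERDICT (by name: the statement is the Claim_ definition above) =====
theorem required_safeguards_py_spec : Claim_equal_required_safeguards_py := by
  intro categories _
  exact pv_main categories
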